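-- pv_equiv track=rewrite | github.com/jeejz/pythonProjects | Sudoku Solver/jij/sudoku/solvingLogic/solverclassmatrix.py | generate_group_keys_for_key
-- ===== SOURCE A (Python) =====
-- def generate_group_keys_for_key(key):
--     grpKeyList = []
--     for i in [0, 3, 6]:
--         if i <= int(key[0]) < i + 3:
--             cKeyX = int((i + i + 2) / 2)
--         if i <= int(key[1]) < i + 3:
--             cKeyY = int((i + i + 2) / 2)
--     for k in [cKeyX - 1, cKeyX, cKeyX + 1]:
--         for l in [cKeyY - 1, cKeyY, cKeyY + 1]:
--             grpKeyList.append(str(k) + str(l))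
--     return grpKeyList
-- ===== SOURCE B (Python) =====
-- def generate_group_keys_for_key(key):
--     cX = 3 * (int(key[0]) // 3) + 1
--     cY = 3 * (int(key[1]) // 3) + 1
--     return [str(k) + str(l) for k in (cX - 1, cX, cX + 1) for l in (cY - 1, cY, cY + 1)]
-- ===== Notes on version B (the rewrite author's own statement) =====
-- stated objective: simpler
-- what changed: Replaces the scan over block starts [0,3,6] with the closed-form block center 3*(d//3)+1 per coordinate, and the explicit append loop with a comprehension.
import Mathlib
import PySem

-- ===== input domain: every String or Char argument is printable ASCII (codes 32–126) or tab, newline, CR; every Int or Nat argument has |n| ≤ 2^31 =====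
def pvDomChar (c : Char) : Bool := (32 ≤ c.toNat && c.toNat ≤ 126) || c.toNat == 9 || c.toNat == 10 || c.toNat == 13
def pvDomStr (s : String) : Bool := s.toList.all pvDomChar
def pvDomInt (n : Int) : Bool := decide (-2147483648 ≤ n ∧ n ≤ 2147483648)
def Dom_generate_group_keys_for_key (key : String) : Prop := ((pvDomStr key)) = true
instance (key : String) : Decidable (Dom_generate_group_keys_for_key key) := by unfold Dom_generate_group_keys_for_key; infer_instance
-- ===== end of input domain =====

-- B replaces A's scan over the block starts [0,3,6] by the closed-form block
-- center 3*(d//3)+1 per coordinate (objective: simpler).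

-- ===== PORT A =====
def generate_group_keys_for_key (key : String) : List String :=
  -- int(key[0]) / int(key[1])
  match (PySem.Str.pyGet? key 0).bind (fun c => PySem.Int.ofChars? [c]),
        (PySem.Str.pyGet? key 1).bind (fun c => PySem.Int.ofChars? [c]) with
  | some d0, some d1 =>
    -- for i in [0,3,6]: the two independent ifs update (cKeyX, cKeyY)
    let p := ([0, 3, 6] : List Int).foldl
      (fun (p : Option Int × Option Int) i =>
        let cX := if i ≤ d0 ∧ d0 < i + 3 then some (PySem.Int.truncdiv (i + i + 2) 2) else p.1
        let cY := if i ≤ d1 ∧ d1 < i + 3 then some (PySem.Int.truncdiv (i + i + 2) 2) else p.2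
        (cX, cY)) (none, none)
    match p with
    | (some cX, some cY) =>
      ([cX - 1, cX, cX + 1]).foldl (fun acc k =>
        ([cY - 1, cY, cY + 1]).foldl (fun acc l =>
          acc ++ [String.ofList (PySem.Int.toChars k ++ PySem.Int.toChars l)]) acc) []
    | _ => []  -- UnboundLocalError (outside Pre_)
  | _, _ => []  -- IndexError / ValueError (outside Pre_)

-- ===== PORT B =====
def generate_group_keys_for_key_alt (key : String) : List String :=
  -- int(key[0]) / int(key[1]); `none` = the exception, on which nothing is claimed
  (((PySem.Str.pyGet? key 0).bind (fun c => PySem.Int.ofChars? [c])).bind (fun d0 =>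
   ((PySem.Str.pyGet? key 1).bind (fun c => PySem.Int.ofChars? [c])).map (fun d1 =>
    let cX := 3 * PySem.Int.floordiv d0 3 + 1
    let cY := 3 * PySem.Int.floordiv d1 3 + 1
    ([cX - 1, cX, cX + 1]).flatMap (fun k =>
      ([cY - 1, cY, cY + 1]).map (fun l =>
        String.ofList (PySem.Int.toChars k ++ PySem.Int.toChars l)))))).getD []

-- ===== PRECONDITION & SPEC =====
-- Pre_: the first two characters exist and are digits '0'..'8' — exactly the inputs
-- where A returns (otherwise it raises IndexError, ValueError or UnboundLocalError).
def Pre_generate_group_keys_for_key (key : String) : Prop :=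
  (match key.toList with
  | c0 :: c1 :: _ =>
      ['0','1','2','3','4','5','6','7','8'].contains c0 && ['0','1','2','3','4','5','6','7','8'].contains c1
  | _ => false) = true
instance (key : String) : Decidable (Pre_generate_group_keys_for_key key) := by
  unfold Pre_generate_group_keys_for_key; infer_instance

def pvWitness_generate_group_keys_for_key : String := "45"

def Spec_generate_group_keys_for_key (key : String) (out : List String) : Prop := out = generate_group_keys_for_key_alt key
instance (key : String) (out : List String) : Decidable (Spec_generate_group_keys_for_key key out) := by unfold Spec_generate_group_keys_for_key; infer_instance

-- ===== CLAIM (what is proved, stated in full; the proofs are below) =====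
def Claim_equal_generate_group_keys_for_key : Prop := ∀ (key : String), Dom_generate_group_keys_for_key key → Pre_generate_group_keys_for_key key → Spec_generate_group_keys_for_key key (generate_group_keys_for_key key)

-- ===== LEMMAS AND PROOFS =====

lemma pyIntAt_eq (key : String) (c0 c1 : Char) (rest : List Char)
    (h : key.toList = c0 :: c1 :: rest) :
    (PySem.Str.pyGet? key 0).bind (fun c => PySem.Int.ofChars? [c]) = PySem.Int.ofChars? [c0] ∧
    (PySem.Str.pyGet? key 1).bind (fun c => PySem.Int.ofChars? [c]) = PySem.Int.ofChars? [c1] := by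
  have h1 : (0:Int) ≤ (rest.length:Int) + 1 := by positivity
  have h2 : (1:Int) ≤ (rest.length:Int) + 1 + 1 := by omega
  simp [PySem.List.pyGet?, PySem.List.pyIdx?, h, h1]

-- ===== VERDICT (by name: the statement is the Claim_ definition above) =====
theorem generate_group_keys_for_key_spec : Claim_equal_generate_group_keys_for_key := by
  intro key _ hpre
  unfold Pre_generate_group_keys_for_key at hpre
  unfold Spec_generate_group_keys_for_key
  rcases h : key.toList with _ | ⟨c0, _ | ⟨c1, rest⟩⟩ <;> rw [h] at hpre
  · exact absurd hpre (by simp)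
  · exact absurd hpre (by simp)
  · obtain ⟨q0, q1⟩ := pyIntAt_eq key c0 c1 rest h
    simp only [Bool.and_eq_true, List.contains_eq_mem, decide_eq_true_eq] at hpre
    obtain ⟨h0, h1⟩ := hpre
    unfold generate_group_keys_for_key generate_group_keys_for_key_alt
    rw [q0, q1]
    fin_cases h0 <;> fin_cases h1 <;> rfl
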